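-- pv_equiv track=rewrite | github.com/ederrf/friends | backend/app/services/import_service.py | _unfold_vcf
-- ===== SOURCE A (Python) =====
-- def _unfold_vcf(text: str) -> list[str]:
--     """Aplica line-folding reverso: linha iniciada por espaco/tab se
--     junta a anterior (RFC 6350 § 3.2)."""
--     if not text:
--         return []
--     raw_lines = text.replace("\r\n", "\n").replace("\r", "\n").split("\n")
--     folded: list[str] = []
--     for line in raw_lines:
--         if line.startswith((" ", "\t")) and folded:
--             folded[-1] += line[1:]
--         else:
--             folded.append(line)
--     return folded
-- ===== SOURCE B (Python) =====
-- import re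
--
-- def _unfold_vcf(text: str) -> list[str]:
--     """Reverse line-folding by string rewriting: delete every newline that is
--     immediately followed by one space/tab, then split on newlines."""
--     if not text:
--         return []
--     normalized = text.replace("\r\n", "\n").replace("\r", "\n")
--     return re.sub(r'\n[ \t]', '', normalized).split("\n")
-- ===== Notes on version B (the rewrite author's own statement) =====
-- stated objective: idiomatic
-- what changed: The explicit per-line loop with a mutable accumulator list is replaced by a single regex substitution that deletes every newline followed by exactly one space/tab, then one split on newlines.
import Mathlib
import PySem

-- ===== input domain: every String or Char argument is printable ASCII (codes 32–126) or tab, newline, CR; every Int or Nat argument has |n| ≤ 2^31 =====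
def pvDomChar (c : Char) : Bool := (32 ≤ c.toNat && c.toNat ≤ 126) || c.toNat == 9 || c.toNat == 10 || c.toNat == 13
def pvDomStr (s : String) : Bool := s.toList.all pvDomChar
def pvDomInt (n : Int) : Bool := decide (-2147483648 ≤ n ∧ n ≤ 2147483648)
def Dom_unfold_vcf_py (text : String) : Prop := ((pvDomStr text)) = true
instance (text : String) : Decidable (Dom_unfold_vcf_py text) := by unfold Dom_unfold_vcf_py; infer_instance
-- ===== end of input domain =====

-- B replaces A's stateful per-line fold loop by a single regex-style substitution
-- (delete each newline followed by one space/tab) and one split; same cost, more idiomatic.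

-- ===== PORT A =====
def unfold_vcf_py (text : String) : List String :=
  if text = "" then []
  else
    -- text.replace("\r\n","\n").replace("\r","\n").split("\n"); sep "\n" is nonempty so split? is `some`
    let raw_lines :=
      (PySem.Str.split? (PySem.Str.replace (PySem.Str.replace text "\r\n" "\n") "\r" "\n") "\n").getD []
    raw_lines.foldl (fun folded line =>
      if (PySem.Str.startswith line " " || PySem.Str.startswith line "\t") && !folded.isEmpty then
        -- folded[-1] += line[1:]
        folded.dropLast ++ [folded.getLast! ++ PySem.Str.slice line (some 1) none]
      else
        folded ++ [line]) []

-- ===== PORT B =====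
-- hand port of re.sub(r'\n[ \t]', '', s): exact for this pattern — leftmost,
-- non-overlapping scan deleting each '\n' followed by one space or tab
def pySubNL : List Char → List Char
  | '\n' :: c :: rest => if c = ' ' || c = '\t' then pySubNL rest else '\n' :: pySubNL (c :: rest)
  | c :: rest => c :: pySubNL rest
  | [] => []

def unfold_vcf_py_alt (text : String) : List String :=
  if text = "" then []
  else
    let normalized := PySem.Str.replace (PySem.Str.replace text "\r\n" "\n") "\r" "\n"
    (PySem.Str.split? (String.ofList (pySubNL normalized.toList)) "\n").getD []

-- ===== PRECONDITION & SPEC =====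
def Spec_unfold_vcf_py (text : String) (out : List String) : Prop := out = unfold_vcf_py_alt text
instance (text : String) (out : List String) : Decidable (Spec_unfold_vcf_py text out) := by unfold Spec_unfold_vcf_py; infer_instance

-- ===== CLAIM (what is proved, stated in full; the proofs are below) =====
def Claim_equal_unfold_vcf_py : Prop := ∀ (text : String), Dom_unfold_vcf_py text → Spec_unfold_vcf_py text (unfold_vcf_py text)

-- ===== LEMMAS AND PROOFS =====

-- splitting a char list on '\n', structurally
def nlSplit : List Char → List (List Char)
  | [] => [[]]
  | c :: r => if c = '\n' then [] :: nlSplit r else (nlSplit r).modifyHead (c :: ·)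

lemma nlSplit_nil : nlSplit [] = [[]] := rfl

lemma nlSplit_cons (c : Char) (r : List Char) :
    nlSplit (c :: r) = if c = '\n' then [] :: nlSplit r else (nlSplit r).modifyHead (c :: ·) := rfl

lemma nlSplit_ne_nil : ∀ cs : List Char, nlSplit cs ≠ [] := by
  intro cs
  induction cs with
  | nil => simp [nlSplit_nil]
  | cons c r ih =>
    rw [nlSplit_cons]
    split_ifs
    · simp
    · cases h : nlSplit r with
      | nil => exact absurd h ih
      | cons a b => simp [h, List.modifyHead]

lemma pySubNL_cons_ne (c : Char) (l : List Char) (hc : c ≠ '\n') :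
    pySubNL (c :: l) = c :: pySubNL l :=
  pySubNL.eq_2 c l (fun _ _ h _ => absurd h hc)

lemma nlSplit_no_nl_append (a xs : List Char) (ha : '\n' ∉ a) :
    nlSplit (a ++ xs) = (nlSplit xs).modifyHead (a ++ ·) := by
  induction a with
  | nil =>
    rw [List.nil_append]
    cases h : nlSplit xs with
    | nil => exact absurd h (nlSplit_ne_nil xs)
    | cons hh t => simp [List.modifyHead]
  | cons c a ih =>
    have hc : c ≠ '\n' := by intro h; exact ha (by simp [h])
    rw [List.cons_append, nlSplit_cons, if_neg hc, ih (by intro h; exact ha (by simp [h]))]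
    cases h : nlSplit xs with
    | nil => exact absurd h (nlSplit_ne_nil xs)
    | cons hh t => simp [List.modifyHead]

lemma nlSplit_no_nl (a : List Char) (ha : '\n' ∉ a) : nlSplit a = [a] := by
  have := nlSplit_no_nl_append a [] ha
  simpa [nlSplit_nil, List.modifyHead] using this

-- characterization of PySem's splitOn for sep = ['\n']
lemma splitOn_go_nl (fuel : Nat) : ∀ (l cur : List Char) (acc : List (List Char)),
    l.length < fuel →
    PySem.Chars.splitOn.go ['\n'] fuel l cur acc
      = acc.reverse ++ (nlSplit l).modifyHead (cur.reverse ++ ·) := by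
  induction fuel with
  | zero => intro l cur acc h; omega
  | succ fuel ih =>
    intro l cur acc h
    cases l with
    | nil =>
      rw [PySem.Chars.splitOn.go.eq_def]
      simp [nlSplit_nil, List.modifyHead]
    | cons c rest =>
      have hpre : (['\n'].isPrefixOf (c :: rest)) = (c == '\n') := by
        simp [List.isPrefixOf, eq_comm]
      rw [PySem.Chars.splitOn.go.eq_def]
      simp only [hpre]
      by_cases hc : c = '\n'
      · subst hc
        simp only [beq_self_eq_true, if_pos]
        simp only [show (['\n'] : List Char).length = 1 from rfl, List.drop_succ_cons, List.drop_zero]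
        rw [ih rest [] (cur.reverse :: acc) (by simpa using Nat.lt_of_succ_lt_succ h)]
        rw [nlSplit_cons, if_pos rfl]
        simp only [List.length_cons, List.drop_succ_cons, List.drop_zero, List.reverse_cons,
          List.reverse_nil, List.nil_append]
        cases hr : nlSplit rest with
        | nil => exact absurd hr (nlSplit_ne_nil rest)
        | cons hh t => simp [List.modifyHead]
      · have : (c == '\n') = false := by simp [hc]
        simp only [this, Bool.false_eq_true, if_neg, not_false_eq_true]
        rw [ih rest (c :: cur) acc (by simpa using Nat.lt_of_succ_lt_succ h)]
        rw [nlSplit_cons, if_neg hc]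
        simp only [List.reverse_cons]
        cases hr : nlSplit rest with
        | nil => exact absurd hr (nlSplit_ne_nil rest)
        | cons hh t => simp [List.modifyHead]

lemma splitOn_nl (s : List Char) : PySem.Chars.splitOn s ['\n'] = nlSplit s := by
  unfold PySem.Chars.splitOn
  rw [splitOn_go_nl (s.length + 1) s [] [] (by omega)]
  cases h : nlSplit s with
  | nil => exact absurd h (nlSplit_ne_nil s)
  | cons hh t => simp [List.modifyHead]

-- list-level version of A's fold step
def stepL (folded : List (List Char)) (line : List Char) : List (List Char) :=
  if (PySem.Chars.startswith line [' '] || PySem.Chars.startswith line ['\t']) && !folded.isEmpty then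
    folded.dropLast ++ [folded.getLast! ++ line.tail]
  else
    folded ++ [line]

lemma getLast!_concat {α : Type} [Inhabited α] (l : List α) (a : α) : (l ++ [a]).getLast! = a := by
  induction l with
  | nil => rfl
  | cons b l ih =>
    cases l with
    | nil => rfl
    | cons c t => simpa [List.getLast!, List.getLast?] using ih

lemma stepL_concat_space (acc : List (List Char)) (a : List Char) (c : Char) (h : List Char)
    (hc : c = ' ' ∨ c = '\t') :
    stepL (acc ++ [a]) (c :: h) = acc ++ [a ++ h] := by
  unfold stepL
  have hsw : (PySem.Chars.startswith (c :: h) [' '] || PySem.Chars.startswith (c :: h) ['\t']) = true := by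
    rcases hc with hc | hc <;> subst hc <;> simp [PySem.Chars.startswith, List.isPrefixOf]
  rw [hsw]
  simp [List.dropLast_concat, getLast!_concat]

lemma stepL_append (folded : List (List Char)) (line : List Char)
    (hl : ¬ ((PySem.Chars.startswith line [' '] || PySem.Chars.startswith line ['\t']) = true ∧ folded ≠ [])) :
    stepL folded line = folded ++ [line] := by
  unfold stepL
  split_ifs with h
  · exfalso; apply hl
    constructor
    · exact (Bool.and_eq_true _ _ ▸ h).1
    · have := (Bool.and_eq_true _ _ ▸ h).2
      simp only [Bool.not_eq_eq_eq_not, Bool.not_true] at this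
      intro he; subst he; simp at this
  · rfl

-- the head of nlSplit cs starts with a space/tab only if cs itself does
lemma nlSplit_head_startswith (cs : List Char) :
    (PySem.Chars.startswith (nlSplit cs).headI [' '] = true → cs.headI = ' ') ∧
    (PySem.Chars.startswith (nlSplit cs).headI ['\t'] = true → cs.headI = '\t') := by
  cases cs with
  | nil =>
    simp only [nlSplit_nil, List.headI]
    constructor <;> (intro h; exact absurd h (by decide))
  | cons c r =>
    rw [nlSplit_cons]
    split_ifs with hc
    · simp only [List.headI]
      constructor <;> (intro h; exact absurd h (by decide))
    · cases hr : nlSplit r with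
      | nil => exact absurd hr (nlSplit_ne_nil r)
      | cons hh t =>
        simp only [hr, List.modifyHead, List.headI]
        constructor <;>
          (intro h;
           simp only [PySem.Chars.startswith, List.isPrefixOf, Bool.and_eq_true, beq_iff_eq,
             List.isPrefixOf_nil_left, and_true] at h;
           exact h.symm)

-- the main invariant: folding the remaining lines, with the current partial line a
lemma fold_mid (cs : List Char) : ∀ (a : List Char) (acc : List (List Char)), '\n' ∉ a →
    List.foldl stepL (acc ++ [a ++ (nlSplit cs).headI]) (nlSplit cs).tail
      = acc ++ nlSplit (a ++ pySubNL cs) := by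
  induction cs using pySubNL.induct with
  | case1 c rest hc ih =>
    -- cs = '\n' :: c :: rest, c space/tab
    intro a acc ha
    have hc' : c = ' ' ∨ c = '\t' := by simpa using hc
    have hcne : c ≠ '\n' := by rcases hc' with h | h <;> subst h <;> decide
    obtain ⟨h, t, hr⟩ : ∃ h t, nlSplit rest = h :: t := by
      cases hx : nlSplit rest with
      | nil => exact absurd hx (nlSplit_ne_nil rest)
      | cons hh tt => exact ⟨hh, tt, rfl⟩
    have hcs : nlSplit ('\n' :: c :: rest) = [] :: (c :: h) :: t := by
      rw [nlSplit_cons, if_pos rfl, nlSplit_cons, if_neg hcne, hr]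
      rfl
    rw [hcs]
    simp only [List.headI, List.tail, List.append_nil, List.foldl_cons]
    rw [stepL_concat_space acc a c h hc']
    have hmid := ih a acc ha
    rw [hr] at hmid
    simp only [List.headI, List.tail] at hmid
    rw [hmid]
    have hsub : pySubNL ('\n' :: c :: rest) = pySubNL rest := by
      rw [pySubNL.eq_1, if_pos hc]
    rw [hsub]
  | case2 c rest hc ih =>
    -- cs = '\n' :: c :: rest, c not space/tab
    intro a acc ha
    obtain ⟨h, t, hr⟩ : ∃ h t, nlSplit (c :: rest) = h :: t := by
      cases hx : nlSplit (c :: rest) with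
      | nil => exact absurd hx (nlSplit_ne_nil _)
      | cons hh tt => exact ⟨hh, tt, rfl⟩
    have hcs : nlSplit ('\n' :: c :: rest) = [] :: h :: t := by
      rw [nlSplit_cons, if_pos rfl, hr]
    rw [hcs]
    simp only [List.headI, List.tail, List.append_nil, List.foldl_cons]
    have hnostart : ¬ ((PySem.Chars.startswith h [' '] || PySem.Chars.startswith h ['\t']) = true ∧ (acc ++ [a]) ≠ []) := by
      rintro ⟨hsw, -⟩
      have hh := nlSplit_head_startswith (c :: rest)
      rw [hr] at hh
      simp only [List.headI] at hh
      rcases Bool.or_eq_true _ _ ▸ hsw with h1 | h1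
      · have := hh.1 h1; simp only [List.headI] at this; simp [this] at hc
      · have := hh.2 h1; simp only [List.headI] at this; simp [this] at hc
    rw [stepL_append _ _ hnostart]
    have hmid := ih [] (acc ++ [a]) (by simp)
    rw [hr] at hmid
    simp only [List.headI, List.tail, List.nil_append] at hmid
    rw [hmid]
    have hsub : pySubNL ('\n' :: c :: rest) = '\n' :: pySubNL (c :: rest) := by
      rw [pySubNL.eq_1, if_neg hc]
    rw [hsub, nlSplit_no_nl_append a _ ha, nlSplit_cons, if_pos rfl]
    simp [List.modifyHead]
  | case3 c rest hne ih =>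
    -- cs = c :: rest, not of the shape '\n' :: _ :: _
    intro a acc ha
    by_cases hc : c = '\n'
    · -- then rest = []
      subst hc
      cases rest with
      | nil =>
        rw [nlSplit_cons, if_pos rfl, nlSplit_nil]
        simp only [List.headI, List.tail, List.append_nil, List.foldl_cons, List.foldl_nil]
        rw [stepL_append _ _ (by rintro ⟨hsw, -⟩; simp [PySem.Chars.startswith, List.isPrefixOf] at hsw)]
        have hsub : pySubNL ['\n'] = ['\n'] := pySubNL.eq_2 '\n' [] (fun _ _ _ h => by cases h)
        rw [hsub, nlSplit_no_nl_append a _ ha, nlSplit_cons, if_pos rfl, nlSplit_nil]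
        simp [List.modifyHead]
      | cons d r => exact absurd rfl (fun h => hne d r h rfl)
    · obtain ⟨h, t, hr⟩ : ∃ h t, nlSplit rest = h :: t := by
        cases hx : nlSplit rest with
        | nil => exact absurd hx (nlSplit_ne_nil rest)
        | cons hh tt => exact ⟨hh, tt, rfl⟩
      have hcs : nlSplit (c :: rest) = (c :: h) :: t := by
        rw [nlSplit_cons, if_neg hc, hr]; rfl
      rw [hcs]
      simp only [List.headI, List.tail]
      have h1 : a ++ c :: h = (a ++ [c]) ++ h := by simp
      rw [h1]
      have ihx := ih (a ++ [c]) acc (by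
        intro hx
        rcases List.mem_append.mp hx with h' | h'
        · exact ha h'
        · simp only [List.mem_singleton] at h'; exact hc h'.symm)
      rw [hr] at ihx
      simp only [List.headI, List.tail] at ihx
      rw [ihx, pySubNL_cons_ne c rest hc]
      simp
  | case4 =>
    intro a acc ha
    simp [nlSplit_nil, pySubNL, nlSplit_no_nl a ha]

-- bridging the String-level fold of port A to the list-level stepL
lemma fold_map (ls : List (List Char)) : ∀ (acc : List (List Char)),
    List.foldl (fun folded line =>
      if (PySem.Str.startswith line " " || PySem.Str.startswith line "\t") && !folded.isEmpty then
        folded.dropLast ++ [folded.getLast! ++ PySem.Str.slice line (some 1) none]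
      else folded ++ [line]) (acc.map String.ofList) (ls.map String.ofList)
      = (List.foldl stepL acc ls).map String.ofList := by
  induction ls with
  | nil => intro acc; rfl
  | cons l ls ih =>
    intro acc
    have hstep :
        (if (PySem.Str.startswith (String.ofList l) " " || PySem.Str.startswith (String.ofList l) "\t") && !(acc.map String.ofList).isEmpty then
          (acc.map String.ofList).dropLast ++ [(acc.map String.ofList).getLast! ++ PySem.Str.slice (String.ofList l) (some 1) none]
        else (acc.map String.ofList) ++ [String.ofList l]) = (stepL acc l).map String.ofList := by
      unfold stepL
      have hsw1 : PySem.Str.startswith (String.ofList l) " " = PySem.Chars.startswith l [' '] := by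
        simp [PySem.Str.startswith]
      have hsw2 : PySem.Str.startswith (String.ofList l) "\t" = PySem.Chars.startswith l ['\t'] := by
        simp [PySem.Str.startswith]
      have hemp : (acc.map String.ofList).isEmpty = acc.isEmpty := by cases acc <;> rfl
      rw [hsw1, hsw2, hemp]
      split_ifs with hcond
      · cases acc with
        | nil => simp at hcond
        | cons a0 at0 =>
          obtain ⟨bs, b, hab⟩ : ∃ bs b, a0 :: at0 = bs ++ [b] :=
            ⟨(a0 :: at0).dropLast, (a0 :: at0).getLast (by simp), (List.dropLast_append_getLast (by simp)).symm⟩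
          rw [hab]
          have hsl : PySem.Str.slice (String.ofList l) (some 1) none = String.ofList l.tail := by
            simp [PySem.Str.slice, PySem.Chars.slice_eq_listSlice, PySem.List.slice_from_one]
          rw [hsl]
          simp only [List.map_append, List.map_cons, List.map_nil, List.dropLast_concat,
            getLast!_concat]
          simp [← String.ofList_append]
      · rw [List.map_append, List.map_cons, List.map_nil]
    simp only [List.map_cons, List.foldl_cons]
    rw [hstep]
    exact ih (stepL acc l)

lemma split_getD (s : List Char) :
    (PySem.Str.split? (String.ofList s) "\n").getD [] = (nlSplit s).map String.ofList := by
  simp [PySem.Str.split?, PySem.Chars.split?, splitOn_nl, show ("\n" : String).toList = ['\n'] from rfl]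

-- ===== VERDICT (by name: the statement is the Claim_ definition above) =====
theorem unfold_vcf_py_spec : Claim_equal_unfold_vcf_py := by
  intro text _
  unfold Spec_unfold_vcf_py unfold_vcf_py unfold_vcf_py_alt
  by_cases he : text = ""
  · simp [he]
  · simp only [he, if_false]
    have hA : (PySem.Str.split? (PySem.Str.replace (PySem.Str.replace text "\r\n" "\n") "\r" "\n") "\n").getD []
        = (nlSplit (PySem.Str.replace (PySem.Str.replace text "\r\n" "\n") "\r" "\n").toList).map String.ofList := by
      have hs := split_getD (PySem.Str.replace (PySem.Str.replace text "\r\n" "\n") "\r" "\n").toList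
      rw [String.ofList_toList] at hs
      exact hs
    rw [hA, split_getD]
    generalize (PySem.Str.replace (PySem.Str.replace text "\r\n" "\n") "\r" "\n").toList = ns
    obtain ⟨h, t, hr⟩ : ∃ h t, nlSplit ns = h :: t := by
      cases hx : nlSplit ns with
      | nil => exact absurd hx (nlSplit_ne_nil ns)
      | cons hh tt => exact ⟨hh, tt, rfl⟩
    rw [hr]
    have hfm := fold_map (h :: t) []
    simp only [List.map_nil] at hfm
    rw [hfm]
    have hfirst : stepL [] h = [h] := stepL_append [] h (by rintro ⟨-, hne⟩; exact hne rfl)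
    have hmid := fold_mid ns [] [] (by simp)
    rw [hr] at hmid
    simp only [List.headI, List.tail, List.nil_append] at hmid
    have hfold : List.foldl stepL [] (h :: t) = nlSplit (pySubNL ns) := by
      rw [List.foldl_cons, hfirst]; exact hmid
    rw [hfold]
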